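-- pv_equiv track=rewrite | github.com/alexpradap/python_coursera | Semana 3/producto_mas_barato.py | producto_mas_barato
-- ===== SOURCE A (Python) =====
-- def get_precio(producto: dict) -> int:
--     return (producto.get("precio"))
--
-- def get_producto(producto: dict) -> str:
--     return (producto.get("producto"))
--
-- def producto_mas_barato(catalogo: dict) -> str:
--     if len(catalogo) > 0:
--         key_list = list(catalogo.keys())
--         val_list = list(catalogo.values())
--         lista_productos = []
--         for i in range (0, len(key_list)):
--             producto = {"producto": key_list[i].casefold(), "precio": val_list[i]}
--             lista_productos.append(producto)
--
--         lista_productos.sort(key = get_precio, reverse = False)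
--         menor_valor = lista_productos[0].get("precio")
--
--         cloned_list = lista_productos.copy()
--         for producto in cloned_list:
--             if producto.get("precio") > menor_valor:
--                 lista_productos.remove(producto)
--
--         if menor_valor < 10000:
--             if len(lista_productos) > 1:
--                 lista_productos.sort(key = get_producto, reverse = False)
--             return lista_productos[0].get("producto")
--         else:
--             return None
--     else:
--         return "No hay productos para escoger"
-- ===== SOURCE B (Python) =====
-- def producto_mas_barato(catalogo: dict) -> str:
--     best = None  # (precio, nombre_casefolded) of the current cheapest
--     for nombre, precio in catalogo.items():
--         n = nombre.casefold()
--         if best is None or precio < best[0]: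
--             best = (precio, n)
--         elif precio == best[0] and n < best[1]:
--             best = (precio, n)
--     if best is None:
--         return "No hay productos para escoger"
--     return best[1] if best[0] < 10000 else None
-- ===== Notes on version B (the rewrite author's own statement) =====
-- stated objective: faster
-- what changed: Replaced A's build-list / sort-by-price / quadratic remove-loop / sort-by-name pipeline with a single accumulator pass that tracks the cheapest price and the lexicographically smallest casefolded name for it.
import Mathlib
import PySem

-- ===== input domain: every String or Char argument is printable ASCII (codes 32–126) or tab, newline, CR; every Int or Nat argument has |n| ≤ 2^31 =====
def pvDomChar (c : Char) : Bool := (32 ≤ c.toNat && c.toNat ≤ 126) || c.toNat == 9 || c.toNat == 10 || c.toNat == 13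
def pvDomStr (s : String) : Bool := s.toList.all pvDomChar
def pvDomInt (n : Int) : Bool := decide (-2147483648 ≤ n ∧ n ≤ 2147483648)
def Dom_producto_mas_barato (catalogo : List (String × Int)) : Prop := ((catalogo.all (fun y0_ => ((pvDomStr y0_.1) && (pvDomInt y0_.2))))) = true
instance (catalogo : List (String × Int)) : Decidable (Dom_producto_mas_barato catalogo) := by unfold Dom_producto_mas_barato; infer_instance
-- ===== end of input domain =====

-- B replaces A's build-sort-filter-sort pipeline by one accumulator pass (objective: faster, constant-factor/asymptotic).


-- ===== PORT A =====
-- The dicts {"producto": name, "precio": price} are ported as pairs (name, price);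
-- str.casefold is PySem.Str.lower (exact on the ASCII domain).
-- lista_productos.remove(producto): the element is always a member here, so
-- (remove? …).getD cur never takes its default (Python would raise ValueError otherwise).
def pvStepA (menor : Int) (cur : List (String × Int)) (p : String × Int) : List (String × Int) :=
  if p.2 > menor then (PySem.List.remove? cur p).getD cur else cur

def producto_mas_barato (catalogo : List (String × Int)) : Option String :=
  if catalogo.length > 0 then
    let key_list := catalogo.map Prod.fst
    let val_list := catalogo.map Prod.snd
    let lista0 :=
      (PySem.List.pyRange 0 (key_list.length : Int) 1).foldl
        (fun acc i => acc ++ [(PySem.Str.lower (PySem.List.pyGetD key_list i ""),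
                               PySem.List.pyGetD val_list i 0)]) []
    let lista1 := PySem.List.sorted lista0 (fun p => p.2) false
    let menor_valor := (PySem.List.pyGetD lista1 0 ("", 0)).2
    let cloned_list := lista1
    let lista2 := cloned_list.foldl (pvStepA menor_valor) lista1
    if menor_valor < 10000 then
      let lista3 := if lista2.length > 1 then PySem.List.sorted lista2 (fun p => p.1) false else lista2
      some (PySem.List.pyGetD lista3 0 ("", 0)).1
    else none
  else some "No hay productos para escoger"

-- ===== PORT B =====
def pvStepB (acc : Option (Int × String)) (kv : String × Int) : Option (Int × String) :=
  let n := PySem.Str.lower kv.1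
  match acc with
  | none => some (kv.2, n)
  | some (bp, bn) =>
    if kv.2 < bp then some (kv.2, n)
    else if kv.2 = bp ∧ n < bn then some (kv.2, n)
    else some (bp, bn)

def producto_mas_barato_alt (catalogo : List (String × Int)) : Option String :=
  match catalogo.foldl pvStepB none with
  | none => some "No hay productos para escoger"
  | some (bp, bn) => if bp < 10000 then some bn else none

-- ===== PRECONDITION & SPEC =====
def Spec_producto_mas_barato (catalogo : List (String × Int)) (out : Option String) : Prop := out = producto_mas_barato_alt catalogo
instance (catalogo : List (String × Int)) (out : Option String) : Decidable (Spec_producto_mas_barato catalogo out) := by unfold Spec_producto_mas_barato; infer_instance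

-- ===== CLAIM (what is proved, stated in full; the proofs are below) =====
def Claim_equal_producto_mas_barato : Prop := ∀ (catalogo : List (String × Int)), Dom_producto_mas_barato catalogo → Spec_producto_mas_barato catalogo (producto_mas_barato catalogo)

-- ===== LEMMAS AND PROOFS =====

-- '(price, name) is the best entry of l': its pair occurs in l, its price is minimal,
-- and its name is minimal among the entries of minimal price.
def IsBest (l : List (String × Int)) (a : Int × String) : Prop :=
  (a.2, a.1) ∈ l ∧ (∀ q ∈ l, a.1 ≤ q.2) ∧ (∀ q ∈ l, q.2 = a.1 → a.2 ≤ q.1)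

theorem isBest_unique {l : List (String × Int)} {a b : Int × String}
    (ha : IsBest l a) (hb : IsBest l b) : a = b := by
  obtain ⟨ha1, ha2, ha3⟩ := ha
  obtain ⟨hb1, hb2, hb3⟩ := hb
  have hp : a.1 = b.1 := le_antisymm (ha2 _ hb1) (hb2 _ ha1)
  have hn : a.2 = b.2 := le_antisymm (ha3 _ hb1 hp.symm) (hb3 _ ha1 hp)
  exact Prod.ext hp hn

def pvG (kv : String × Int) : String × Int := (PySem.Str.lower kv.1, kv.2)

def pvStepI (a : Int × String) (q : String × Int) : Int × String :=
  if q.2 < a.1 then (q.2, q.1)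
  else if q.2 = a.1 ∧ q.1 < a.2 then (q.2, q.1)
  else a

theorem foldB_some (l : List (String × Int)) : ∀ a : Int × String,
    l.foldl pvStepB (some a) = some (l.foldl (fun a kv => pvStepI a (pvG kv)) a) := by
  induction l with
  | nil => intro a; rfl
  | cons q l ih =>
    intro a
    have hstep : pvStepB (some a) q = some (pvStepI a (pvG q)) := by
      rcases a with ⟨bp, bn⟩
      simp only [pvStepB, pvStepI, pvG]
      by_cases h1 : q.2 < bp
      · rw [if_pos h1, if_pos h1]
      · rw [if_neg h1, if_neg h1, apply_ite some]
    simp only [List.foldl_cons, hstep, ih]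

theorem foldI_isBest (l : List (String × Int)) : ∀ a : Int × String,
    IsBest ((a.2, a.1) :: l) (l.foldl pvStepI a) := by
  induction l with
  | nil =>
    intro a
    refine ⟨List.mem_cons_self, ?_, ?_⟩
    · intro q hq; rcases List.mem_singleton.mp hq with rfl; simp
    · intro q hq _; rcases List.mem_singleton.mp hq with rfl; simp
  | cons q l ih =>
    intro a
    set s := pvStepI a q with hs
    have hfold : (q :: l).foldl pvStepI a = l.foldl pvStepI s := rfl
    obtain ⟨ih1, ih2, ih3⟩ := ih s
    rw [hfold]
    set r := l.foldl pvStepI s with hr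
    have htri : (s = (q.2, q.1) ∧ (q.2 < a.1 ∨ (q.2 = a.1 ∧ q.1 < a.2))) ∨
        (s = a ∧ a.1 ≤ q.2 ∧ (q.2 = a.1 → a.2 ≤ q.1)) := by
      simp only [hs, pvStepI]
      by_cases h1 : q.2 < a.1
      · rw [if_pos h1]; exact Or.inl ⟨rfl, Or.inl h1⟩
      · by_cases h2 : q.2 = a.1 ∧ q.1 < a.2
        · rw [if_neg h1, if_pos h2]; exact Or.inl ⟨rfl, Or.inr h2⟩
        · rw [if_neg h1, if_neg h2]
          refine Or.inr ⟨rfl, by omega, fun hq => ?_⟩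
          by_contra hn; exact h2 ⟨hq, lt_of_not_ge hn⟩
    have hrs : r.1 ≤ s.1 := ih2 _ List.mem_cons_self
    have hs1a : s.1 ≤ a.1 := by
      rcases htri with ⟨hseq, hc⟩ | ⟨hseq, _, _⟩
      · rw [hseq]; rcases hc with h | h
        · exact le_of_lt h
        · exact le_of_eq h.1
      · rw [hseq]
    have hs1q : s.1 ≤ q.2 := by
      rcases htri with ⟨hseq, _⟩ | ⟨hseq, hle, _⟩
      · rw [hseq]
      · rw [hseq]; exact hle
    refine ⟨?_, ?_, ?_⟩
    · -- membership
      rcases List.mem_cons.mp ih1 with hh | hh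
      · rcases htri with ⟨hseq, _⟩ | ⟨hseq, _, _⟩
        · have hq' : (r.2, r.1) = q := by rw [hh, hseq]
          exact hq' ▸ List.mem_cons_of_mem _ List.mem_cons_self
        · have ha' : (r.2, r.1) = (a.2, a.1) := by rw [hh, hseq]
          exact ha' ▸ List.mem_cons_self
      · exact List.mem_cons_of_mem _ (List.mem_cons_of_mem _ hh)
    · -- price bound
      intro p hp
      rcases List.mem_cons.mp hp with rfl | hp'
      · exact le_trans hrs hs1a
      · rcases List.mem_cons.mp hp' with rfl | hp''
        · exact le_trans hrs hs1q
        · exact ih2 _ (List.mem_cons_of_mem _ hp'')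
    · -- name bound
      intro p hp hpm
      rcases List.mem_cons.mp hp with rfl | hp'
      · -- p = (a.2, a.1), so a.1 = r.1
        simp only at hpm
        have hs1 : s.1 = a.1 := le_antisymm hs1a (hpm ▸ hrs)
        rcases htri with ⟨hseq, hc⟩ | ⟨hseq, _, _⟩
        · have hq2 : q.2 = a.1 := by rw [hseq] at hs1; exact hs1
          have hqn : q.1 < a.2 := by
            rcases hc with h | h
            · exfalso; omega
            · exact h.2
          have hhead := ih3 (s.2, s.1) List.mem_cons_self (by simpa using hs1.trans hpm)
          rw [hseq] at hhead
          exact le_trans hhead (le_of_lt hqn)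
        · have hhead := ih3 (s.2, s.1) List.mem_cons_self (by simpa using hs1.trans hpm)
          rw [hseq] at hhead
          exact hhead
      · rcases List.mem_cons.mp hp' with hpq | hp''
        · -- p = q, q.2 = r.1
          rw [hpq] at hpm ⊢
          rcases htri with ⟨hseq, _⟩ | ⟨hseq, hle, himp⟩
          · have hhd : s.1 = r.1 := by rw [hseq]; exact hpm
            have hhead := ih3 (s.2, s.1) List.mem_cons_self (by simpa using hhd)
            rw [hseq] at hhead
            exact hhead
          · have hq2 : q.2 = a.1 := by rw [hseq] at hrs hs1a; omega
            have hq1 : a.2 ≤ q.1 := himp hq2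
            have hhd : s.1 = r.1 := by rw [hseq]; omega
            have hhead := ih3 (s.2, s.1) List.mem_cons_self (by simpa using hhd)
            rw [hseq] at hhead
            exact le_trans hhead hq1
        · exact ih3 _ (List.mem_cons_of_mem _ hp'') hpm

-- B's characterisation
theorem B_char (c : String × Int) (cs : List (String × Int)) :
    ∃ a : Int × String, IsBest ((c :: cs).map pvG) a ∧
      producto_mas_barato_alt (c :: cs) = (if a.1 < 10000 then some a.2 else none) := by
  refine ⟨(cs.map pvG).foldl pvStepI ((pvG c).2, (pvG c).1), ?_, ?_⟩
  · have := foldI_isBest (cs.map pvG) ((pvG c).2, (pvG c).1)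
    simpa using this
  · simp only [producto_mas_barato_alt, List.foldl_cons]
    have h0 : pvStepB none c = some ((pvG c).2, (pvG c).1) := rfl
    rw [h0, foldB_some]
    have : cs.foldl (fun a kv => pvStepI a (pvG kv)) ((pvG c).2, (pvG c).1)
         = (cs.map pvG).foldl pvStepI ((pvG c).2, (pvG c).1) := by rw [List.foldl_map]
    rw [this]

-- remove?: first occurrence in an append when absent from the prefix
theorem remove_append_cons (p : String × Int) (l : List (String × Int)) :
    ∀ A : List (String × Int), p ∉ A →
    PySem.List.remove? (A ++ p :: l) p = some (A ++ l) := by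
  intro A
  induction A with
  | nil => intro _; simp [PySem.List.remove?_cons_self]
  | cons x A ih =>
    intro hp
    have hx : x ≠ p := fun h => hp (h ▸ List.mem_cons_self)
    have hp' : p ∉ A := fun h => hp (List.mem_cons_of_mem _ h)
    rw [List.cons_append, PySem.List.remove?_cons_of_ne _ hx, ih hp']
    rfl

-- the remove loop keeps exactly the entries of minimal price, in order
theorem removeLoop (m : Int) (l : List (String × Int)) :
    ∀ A : List (String × Int), (∀ q ∈ A, q.2 ≤ m) → (∀ q ∈ l, m ≤ q.2) →
    l.foldl (pvStepA m) (A ++ l) = A ++ l.filter (fun q => !decide (q.2 > m)) := by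
  induction l with
  | nil => intro A _ _; simp
  | cons p l ih =>
    intro A hA hl
    have hpl : m ≤ p.2 := hl _ List.mem_cons_self
    have hl' : ∀ q ∈ l, m ≤ q.2 := fun q hq => hl _ (List.mem_cons_of_mem _ hq)
    by_cases hp : p.2 > m
    · have hnotA : p ∉ A := by
        intro h
        have := hA _ h
        omega
      have hstep : pvStepA m (A ++ p :: l) p = A ++ l := by
        simp [pvStepA, hp, remove_append_cons p l A hnotA]
      rw [List.foldl_cons, hstep, ih A hA hl']
      simp [hp]
    · have hstep : pvStepA m (A ++ p :: l) p = (A ++ [p]) ++ l := by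
        simp [pvStepA, hp]
      have hA' : ∀ q ∈ A ++ [p], q.2 ≤ m := by
        intro q hq
        rcases List.mem_append.mp hq with h | h
        · exact hA _ h
        · rcases List.mem_singleton.mp h with rfl; omega
      rw [List.foldl_cons, hstep, ih (A ++ [p]) hA' hl']
      simp [hp]

-- the build loop is exactly map pvG
theorem buildLoop (catalogo : List (String × Int)) :
    (PySem.List.pyRange 0 ((catalogo.map Prod.fst).length : Int) 1).foldl
      (fun acc i => acc ++ [(PySem.Str.lower (PySem.List.pyGetD (catalogo.map Prod.fst) i ""),
                             PySem.List.pyGetD (catalogo.map Prod.snd) i 0)]) []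
      = catalogo.map pvG := by
  have hbody : ∀ (acc : List (String × Int)), ∀ i ∈ PySem.List.pyRange 0 ((catalogo.length : Int)) 1,
      acc ++ [(PySem.Str.lower (PySem.List.pyGetD (catalogo.map Prod.fst) i ""),
               PySem.List.pyGetD (catalogo.map Prod.snd) i 0)]
      = acc ++ [pvG (PySem.List.pyGetD catalogo i ("", 0))] := by
    intro acc i _
    have h1 : PySem.List.pyGetD (catalogo.map Prod.fst) i ""
        = (PySem.List.pyGetD catalogo i ("", 0)).1 := by
      simpa using PySem.List.pyGetD_map (f := Prod.fst) (xs := catalogo) (i := i) (d := ("", 0))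
    have h2 : PySem.List.pyGetD (catalogo.map Prod.snd) i 0
        = (PySem.List.pyGetD catalogo i ("", 0)).2 := by
      simpa using PySem.List.pyGetD_map (f := Prod.snd) (xs := catalogo) (i := i) (d := ("", 0))
    rw [h1, h2]; rfl
  rw [List.length_map, List.foldl_ext _ _ [] hbody,
      PySem.List.foldl_pyRange_zero_pyGetD' catalogo ("", 0) (fun acc x => acc ++ [pvG x]) []]
  simpa using PySem.List.foldl_append_singleton_eq_map pvG catalogo []

-- the tail of A after the build loop
def pvAfter (items : List (String × Int)) : Option String :=
  let lista1 := PySem.List.sorted items (fun p => p.2) false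
  let menor_valor := (PySem.List.pyGetD lista1 0 ("", 0)).2
  let lista2 := lista1.foldl (pvStepA menor_valor) lista1
  if menor_valor < 10000 then
    let lista3 := if lista2.length > 1 then PySem.List.sorted lista2 (fun p => p.1) false else lista2
    some (PySem.List.pyGetD lista3 0 ("", 0)).1
  else none

theorem A_eq (catalogo : List (String × Int)) (hlen : catalogo.length > 0) :
    producto_mas_barato catalogo = pvAfter (catalogo.map pvG) := by
  simp only [producto_mas_barato, if_pos hlen, pvAfter]
  rw [buildLoop]

theorem after_char (items : List (String × Int)) (hne : items ≠ []) :
    ∃ a : Int × String, IsBest items a ∧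
      pvAfter items = (if a.1 < 10000 then some a.2 else none) := by
  obtain ⟨h, t, hS⟩ := List.exists_cons_of_ne_nil
    (mt (PySem.List.sorted_eq_nil_iff items (fun p => p.2) false).mp hne)
  have hmin : ∀ y ∈ items, h.2 ≤ y.2 :=
    PySem.List.key_head_sorted_le items (fun p => p.2) hS
  have hminS : ∀ q ∈ h :: t, h.2 ≤ q.2 := by
    intro q hq
    exact hmin q ((PySem.List.mem_sorted items (fun p => p.2) false q).mp (hS ▸ hq))
  have hfold : (h :: t).foldl (pvStepA h.2) (h :: t)
      = (h :: t).filter (fun q => !decide (q.2 > h.2)) := by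
    simpa using removeLoop h.2 (h :: t) [] (by simp) hminS
  have hmemfil : ∀ q, q ∈ (h :: t).filter (fun q => !decide (q.2 > h.2)) ↔ (q ∈ items ∧ q.2 = h.2) := by
    intro q
    rw [List.mem_filter]
    constructor
    · rintro ⟨hq, hdec⟩
      have hq' : q ∈ items := (PySem.List.mem_sorted items (fun p => p.2) false q).mp (hS ▸ hq)
      have := hmin q hq'
      simp at hdec
      exact ⟨hq', by omega⟩
    · rintro ⟨hq, hq2⟩
      refine ⟨hS ▸ (PySem.List.mem_sorted items (fun p => p.2) false q).mpr hq, by simp; omega⟩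
  have hhmem : h ∈ (h :: t).filter (fun q => !decide (q.2 > h.2)) := by
    rw [hmemfil]
    exact ⟨(PySem.List.mem_sorted items (fun p => p.2) false h).mp (hS ▸ List.mem_cons_self), rfl⟩
  have hA : pvAfter items =
      (if h.2 < 10000 then
        some (PySem.List.pyGetD
          (if ((h :: t).filter (fun q => !decide (q.2 > h.2))).length > 1 then
            PySem.List.sorted ((h :: t).filter (fun q => !decide (q.2 > h.2))) (fun p => p.1) false
          else (h :: t).filter (fun q => !decide (q.2 > h.2)))
          0 ("", 0)).1
      else none) := by
    simp only [pvAfter]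
    rw [hS, PySem.List.pyGetD_zero_cons, hfold]
  by_cases hl1 : ((h :: t).filter (fun q => !decide (q.2 > h.2))).length > 1
  · -- tie branch: sort by name
    have hfne : (h :: t).filter (fun q => !decide (q.2 > h.2)) ≠ [] := List.ne_nil_of_mem hhmem
    obtain ⟨h2, t2, hS2⟩ := List.exists_cons_of_ne_nil
      (mt (PySem.List.sorted_eq_nil_iff _ (fun p => p.1) false).mp hfne)
    have hh2fil : h2 ∈ (h :: t).filter (fun q => !decide (q.2 > h.2)) :=
      (PySem.List.mem_sorted _ (fun p => p.1) false h2).mp (hS2 ▸ List.mem_cons_self)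
    obtain ⟨hh2items, hh2m⟩ := (hmemfil h2).mp hh2fil
    refine ⟨(h.2, h2.1), ⟨?_, hmin, ?_⟩, ?_⟩
    · have he : (h2.1, h.2) = h2 := by rw [← hh2m]
      simpa [he] using hh2items
    · intro q hq hqm
      have hqfil : q ∈ (h :: t).filter (fun q => !decide (q.2 > h.2)) := (hmemfil q).mpr ⟨hq, hqm⟩
      exact PySem.List.key_head_sorted_le _ (fun p => p.1) hS2 q hqfil
    · rw [hA, if_pos hl1, hS2, PySem.List.pyGetD_zero_cons]
  · -- at most one cheapest entry
    have hfone : (h :: t).filter (fun q => !decide (q.2 > h.2)) = [h] := by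
      rcases hfe : (h :: t).filter (fun q => !decide (q.2 > h.2)) with _ | ⟨x, xs⟩
      · rw [hfe] at hhmem; simp at hhmem
      · have hxs : xs = [] := by
          rw [hfe] at hl1
          simp only [List.length_cons, gt_iff_lt, not_lt] at hl1
          exact List.eq_nil_of_length_eq_zero (by omega)
        subst hxs
        rw [hfe] at hhmem; simp at hhmem
        subst hhmem
        exact hfe
    refine ⟨(h.2, h.1), ⟨?_, hmin, ?_⟩, ?_⟩
    · exact ((hmemfil h).mp hhmem).1
    · intro q hq hqm
      have hqf : q ∈ (h :: t).filter (fun q => !decide (q.2 > h.2)) := (hmemfil q).mpr ⟨hq, hqm⟩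
      rw [hfone] at hqf
      rcases List.mem_singleton.mp hqf with rfl
      exact le_refl _
    · rw [hA, if_neg hl1, hfone, PySem.List.pyGetD_zero_cons]

-- ===== VERDICT (by name: the statement is the Claim_ definition above) =====
theorem producto_mas_barato_spec : Claim_equal_producto_mas_barato := by
  intro catalogo _
  unfold Spec_producto_mas_barato
  rcases catalogo with _ | ⟨c, cs⟩
  · rfl
  · obtain ⟨a, hA1, hA2⟩ := after_char ((c :: cs).map pvG) (by simp)
    obtain ⟨b, hB1, hB2⟩ := B_char c cs
    rw [A_eq _ (by simp), hA2, hB2, isBest_unique hA1 hB1]
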